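-- pv_equiv track=rewrite | github.com/choco9966/Algorithm-Master | elice/알고리즘1/Lecture 2/[문제 1] 각 자릿수의 차이.py | diffDigit
-- ===== SOURCE A (Python) =====
-- def diffDigit(a, b) :
--     '''
--     a, b의 서로 다른 자리수의 개수를 반환한다
--     '''
--     cnt = 0
--     while a != 0 and b != 0 :
--         cnt += a%10 != b%10
--         a = a // 10
--         b = b // 10
--     if a == 0 :
--         while b != 0 :
--             cnt += 1
--             b = b // 10
--     else :
--         while a != 0 :
--             cnt += 1
--             a = a // 10
--
--     return cnt
-- ===== SOURCE B (Python) =====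
-- def _digits(n):
--     # reversed (least-significant-first) digit list; 0 has no digits, matching the loops' view
--     return [] if n == 0 else [n % 10] + _digits(n // 10)
--
-- def diffDigit(a, b):
--     '''
--     a, b의 서로 다른 자리수의 개수를 반환한다
--     '''
--     da = _digits(a)
--     db = _digits(b)
--     return sum(x != y for x, y in zip(da, db)) + abs(len(da) - len(db))
-- ===== Notes on version B (the rewrite author's own statement) =====
-- stated objective: alternative
-- what changed: B builds each number's least-significant-first digit list recursively, counts mismatches over zip of the two lists, and adds the length difference, instead of A's three destructive peel-by-10 while loops.
import Mathlib
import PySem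

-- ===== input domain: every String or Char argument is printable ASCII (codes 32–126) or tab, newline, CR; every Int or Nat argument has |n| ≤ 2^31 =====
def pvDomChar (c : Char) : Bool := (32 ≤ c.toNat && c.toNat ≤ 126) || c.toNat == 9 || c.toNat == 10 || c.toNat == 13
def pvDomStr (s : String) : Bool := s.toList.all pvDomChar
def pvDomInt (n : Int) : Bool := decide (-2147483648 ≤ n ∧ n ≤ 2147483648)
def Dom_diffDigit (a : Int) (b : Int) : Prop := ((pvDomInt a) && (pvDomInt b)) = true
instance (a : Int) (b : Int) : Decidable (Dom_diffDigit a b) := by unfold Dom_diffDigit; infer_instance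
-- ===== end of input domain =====

-- B replaces A's three digit-peeling while loops by explicit digit lists: count mismatches
-- over zip of the two lists and add the length difference (alternative decomposition, same cost).


-- ===== PORT A =====
-- A's loops peel digits with `% 10` / `// 10`. On the nonnegative inputs on which Python A
-- returns these coincide with Nat `%` / `/`, so the loops are ported as structural
-- recursion on Nat (exact wherever Python A returns; on negative inputs Python A loops forever).
def diffTailA (n : Nat) (cnt : Int) : Int :=
  if n ≠ 0 then diffTailA (n / 10) (cnt + 1) else cnt

def diffLoopA (a b : Nat) (cnt : Int) : Int :=
  if a ≠ 0 ∧ b ≠ 0 then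
    diffLoopA (a / 10) (b / 10) (cnt + if a % 10 ≠ b % 10 then 1 else 0)
  else
    if a = 0 then diffTailA b cnt else diffTailA a cnt

def diffDigit (a : Int) (b : Int) : Int :=
  diffLoopA a.toNat b.toNat 0

-- ===== PORT B =====
-- _digits(n): least-significant-first digit list, [] for 0 (exact wherever Python B returns;
-- Python B recurses forever on negatives).
def digitsB (n : Nat) : List Int :=
  if n = 0 then [] else ((n % 10 : Nat) : Int) :: digitsB (n / 10)

def diffDigit_alt (a : Int) (b : Int) : Int :=
  let da := digitsB a.toNat
  let db := digitsB b.toNat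
  (((da.zip db).map (fun p => if p.1 ≠ p.2 then (1 : Int) else 0)).sum)
    + |((da.length : Int) - (db.length : Int))|

-- ===== PRECONDITION & SPEC =====
-- Both Pythons loop forever on a negative argument (floor division by 10 never reaches 0 from
-- below), and the ports map negatives to 0 via toNat, so the ports are exact wherever the
-- Pythons return; the equivalence of the two ports holds unconditionally.
def Spec_diffDigit (a : Int) (b : Int) (out : Int) : Prop := out = diffDigit_alt a b
instance (a : Int) (b : Int) (out : Int) : Decidable (Spec_diffDigit a b out) := by unfold Spec_diffDigit; infer_instance

-- ===== CLAIM (what is proved, stated in full; the proofs are below) =====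
def Claim_equal_diffDigit : Prop := ∀ (a : Int) (b : Int), Dom_diffDigit a b → Spec_diffDigit a b (diffDigit a b)

-- ===== LEMMAS AND PROOFS =====

theorem digitsB_zero : digitsB 0 = [] := by rw [digitsB]; simp

theorem digitsB_pos {n : Nat} (h : n ≠ 0) :
    digitsB n = ((n % 10 : Nat) : Int) :: digitsB (n / 10) := by
  rw [digitsB, if_neg h]

theorem diffTailA_eq (n : Nat) : ∀ cnt : Int, diffTailA n cnt = cnt + ((digitsB n).length : Int) := by
  induction n using Nat.strong_induction_on with
  | _ n ih =>
    intro cnt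
    rw [diffTailA]
    by_cases h : n = 0
    · simp [h, digitsB_zero]
    · rw [if_pos h, ih (n / 10) (Nat.div_lt_self (Nat.pos_of_ne_zero h) (by omega)),
        digitsB_pos h]
      simp; omega

theorem diffLoopA_eq (a : Nat) : ∀ b : Nat, ∀ cnt : Int,
    diffLoopA a b cnt = cnt +
      ((((digitsB a).zip (digitsB b)).map (fun p => if p.1 ≠ p.2 then (1 : Int) else 0)).sum
        + |(((digitsB a).length : Int) - ((digitsB b).length : Int))|) := by
  induction a using Nat.strong_induction_on with
  | _ a ih =>
    intro b cnt
    rw [diffLoopA]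
    by_cases ha : a = 0
    · subst ha
      rw [if_neg (by simp), if_pos rfl, diffTailA_eq, digitsB_zero]
      simp
    · by_cases hb : b = 0
      · subst hb
        rw [if_neg (by simp), if_neg ha, diffTailA_eq, digitsB_zero]
        simp
      · rw [if_pos ⟨ha, hb⟩, ih (a / 10) (Nat.div_lt_self (Nat.pos_of_ne_zero ha) (by omega)),
          digitsB_pos ha, digitsB_pos hb]
        simp only [List.zip_cons_cons, List.map_cons, List.sum_cons, List.length_cons]
        push_cast
        by_cases hd : ((a % 10 : Nat) : Int) = ((b % 10 : Nat) : Int) <;> simp_all <;> omega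

-- ===== VERDICT (by name: the statement is the Claim_ definition above) =====
theorem diffDigit_spec : Claim_equal_diffDigit := by
  intro a b _
  show diffDigit a b = diffDigit_alt a b
  rw [diffDigit, diffDigit_alt, diffLoopA_eq]
  simp
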